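-- pv_equiv track=rewrite | github.com/lyfe05/test | main.py | custom_encode
-- ===== SOURCE A (Python) =====
-- def custom_encode(input_string):
--     charset = 'ABCDEFGHIJKLMNOPQRSTUVWXYZabcdef'
--     input_bytes = input_string.encode('utf-8')
--     output = []
--     bit_buffer = 0
--     bit_count = 0
--
--     for byte in input_bytes:
--         bit_buffer = (bit_buffer << 8) | byte
--         bit_count += 8
--         while bit_count >= 5:
--             bit_count -= 5
--             value = (bit_buffer >> bit_count) & 0x1F
--             output.append(charset[value])
--             bit_buffer &= (1 << bit_count) - 1
--
--     if bit_count > 0: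
--         bit_buffer <<= (5 - bit_count)
--         value = bit_buffer & 0x1F
--         output.append(charset[value])
--         output.append('=')
--
--     return ''.join(output)
-- ===== SOURCE B (Python) =====
-- def custom_encode(input_string):
--     charset = 'ABCDEFGHIJKLMNOPQRSTUVWXYZabcdef'
--     data = input_string.encode('utf-8')
--     big = int.from_bytes(data, 'big')
--     total_bits = 8 * len(data)
--     out = [charset[(big >> (total_bits - 5 * (i + 1))) & 0x1F]
--            for i in range(total_bits // 5)]
--     rem = total_bits % 5
--     if rem > 0:
--         out.append(charset[(big & ((1 << rem) - 1)) << (5 - rem)])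
--         out.append('=')
--     return ''.join(out)
-- ===== Notes on version B (the rewrite author's own statement) =====
-- stated objective: alternative
-- what changed: Replaced A's streaming bit-buffer with an inner while-loop by a two-stage pass: fold the whole byte string into one big integer, then index each 5-bit group directly by shift/mask over a range, with the padded tail group computed from total_bits % 5.
import Mathlib
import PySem

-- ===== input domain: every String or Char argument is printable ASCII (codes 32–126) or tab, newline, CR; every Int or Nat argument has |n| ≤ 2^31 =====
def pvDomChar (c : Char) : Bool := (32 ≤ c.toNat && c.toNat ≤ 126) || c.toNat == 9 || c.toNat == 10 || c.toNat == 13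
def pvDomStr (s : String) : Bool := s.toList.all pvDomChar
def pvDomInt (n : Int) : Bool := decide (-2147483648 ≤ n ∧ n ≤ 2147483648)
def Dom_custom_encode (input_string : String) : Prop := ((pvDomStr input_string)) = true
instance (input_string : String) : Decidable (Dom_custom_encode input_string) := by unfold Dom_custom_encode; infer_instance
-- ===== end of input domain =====

-- B replaces A's streaming bit-buffer/inner-while with a precompute-then-index pass over one
-- big integer; objective: alternative decomposition (same asymptotic cost).

-- ===== PORT A =====
def ceCharset : List Char := "ABCDEFGHIJKLMNOPQRSTUVWXYZabcdef".toList

-- the inner `while bit_count >= 5` loop of A; terminates because bit_count strictly decreases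
def ceWhile (out : List Char) (buf cnt : Nat) : List Char × Nat × Nat :=
  if 5 ≤ cnt then
    let cnt' := cnt - 5
    -- charset[value]: value = (bit_buffer >> bit_count) & 0x1F is always < 32, in range
    ceWhile (out ++ [ceCharset.getD ((buf >>> cnt') &&& 0x1F) 'A'])
      (buf &&& ((1 <<< cnt') - 1)) cnt'
  else (out, buf, cnt)
termination_by cnt
decreasing_by omega

def custom_encode (input_string : String) : String :=
  -- encode('utf-8') is the identity on code points for the ASCII input domain
  let input_bytes := input_string.toList.map Char.toNat
  let st := input_bytes.foldl
    (fun st byte => ceWhile st.1 ((st.2.1 <<< 8) ||| byte) (st.2.2 + 8))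
    (([] : List Char), 0, 0)
  if 0 < st.2.2 then
    String.mk (st.1 ++ [ceCharset.getD ((st.2.1 <<< (5 - st.2.2)) &&& 0x1F) 'A', '='])
  else String.mk st.1

-- ===== PORT B =====
def altCharset : List Char := "ABCDEFGHIJKLMNOPQRSTUVWXYZabcdef".toList

def custom_encode_alt (input_string : String) : String :=
  -- encode('utf-8') is the identity on code points for the ASCII input domain
  let data := input_string.toList.map Char.toNat
  -- int.from_bytes(data, 'big')
  let big := data.foldl (fun a b => a * 256 + b) 0
  let total_bits := 8 * data.length
  let out := (List.range (total_bits / 5)).map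
    (fun i => altCharset.getD ((big >>> (total_bits - 5 * (i + 1))) &&& 0x1F) 'A')
  let rem := total_bits % 5
  if 0 < rem then
    String.mk (out ++ [altCharset.getD ((big &&& ((1 <<< rem) - 1)) <<< (5 - rem)) 'A', '='])
  else String.mk out

-- ===== PRECONDITION & SPEC =====
def Spec_custom_encode (input_string : String) (out : String) : Prop := out = custom_encode_alt input_string
instance (input_string : String) (out : String) : Decidable (Spec_custom_encode input_string out) := by unfold Spec_custom_encode; infer_instance

-- ===== CLAIM (what is proved, stated in full; the proofs are below) =====
def Claim_equal_custom_encode : Prop := ∀ (input_string : String), Dom_custom_encode input_string → Spec_custom_encode input_string (custom_encode input_string)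

-- ===== LEMMAS AND PROOFS =====

-- B's character at output index i, for total bit count T and big-endian value `big`
def ceF (T big : Nat) (i : Nat) : Char :=
  altCharset.getD ((big >>> (T - 5 * (i + 1))) &&& 0x1F) 'A'

theorem ceAnd31 (x : Nat) : x &&& 0x1F = x % 2 ^ 5 := Nat.and_two_pow_sub_one_eq_mod x 5

theorem ceOrAdd (a b : Nat) (hb : b < 2 ^ 8) : (a <<< 8) ||| b = a * 2 ^ 8 + b := by
  rw [Nat.shiftLeft_eq, Nat.mul_comm, ← Nat.two_pow_add_eq_or_of_lt hb, Nat.mul_comm]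

theorem ceAndMask (x k : Nat) : x &&& ((1 <<< k) - 1) = x % 2 ^ k := by
  rw [Nat.one_shiftLeft]; exact Nat.and_two_pow_sub_one_eq_mod x k

-- dropping the top 8 bits (one byte) of the big value
theorem ceTopByteDiv (a b : Nat) (hb : b < 2 ^ 8) : (a * 2 ^ 8 + b) / 2 ^ 8 = a := by
  have h : (2 : Nat) ^ 8 = 256 := by norm_num
  rw [h] at hb ⊢; omega

theorem ceTopWindow (a b t : Nat) (hb : b < 2 ^ 8) :
    (a * 2 ^ 8 + b) >>> (t + 8) = a >>> t := by
  rw [Nat.shiftRight_eq_div_pow, Nat.shiftRight_eq_div_pow, pow_add,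
    Nat.mul_comm (2 ^ t), ← Nat.div_div_eq_div_mul, ceTopByteDiv a b hb]

-- ((big % 2^cnt) >>> (cnt-5)) % 2^5 = (big >>> (cnt-5)) % 2^5
theorem ceWindowMod (big cnt : Nat) (h : 5 ≤ cnt) :
    ((big % 2 ^ cnt) >>> (cnt - 5)) % 2 ^ 5 = (big >>> (cnt - 5)) % 2 ^ 5 := by
  rw [Nat.shiftRight_eq_div_pow, Nat.shiftRight_eq_div_pow]
  have h2 : (2:Nat) ^ cnt = 2 ^ (cnt - 5) * 2 ^ 5 := by rw [← pow_add]; congr 1; omega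
  rw [h2, Nat.mod_mul_right_div_self, Nat.mod_mod_of_dvd _ dvd_rfl]

theorem ceModMod (big j k : Nat) (h : j ≤ k) : (big % 2 ^ k) % 2 ^ j = big % 2 ^ j :=
  Nat.mod_mod_of_dvd big (pow_dvd_pow 2 h)

-- the inner while loop, run on buf = big % 2^cnt with (T - cnt) bits already emitted
theorem ceWhile_spec (cnt big T : Nat) (hle : cnt ≤ T) (hdvd : 5 ∣ (T - cnt)) :
    ceWhile ((List.range ((T - cnt) / 5)).map (ceF T big)) (big % 2 ^ cnt) cnt
    = ((List.range (T / 5)).map (ceF T big), big % 2 ^ (cnt % 5), cnt % 5) := by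
  induction cnt using Nat.strong_induction_on with
  | _ cnt ih =>
    rw [ceWhile]
    by_cases h5 : 5 ≤ cnt
    · simp only [if_pos h5]
      obtain ⟨q, hq⟩ := hdvd
      have hq5 : T - cnt = 5 * q := hq
      have hchar : ceCharset.getD ((big % 2 ^ cnt) >>> (cnt - 5) &&& 0x1F) 'A'
          = ceF T big ((T - cnt) / 5) := by
        unfold ceF
        have harg : T - 5 * ((T - cnt) / 5 + 1) = cnt - 5 := by omega
        rw [harg, ceAnd31, ceAnd31, ceWindowMod big cnt h5]
        rfl
      have hrange : (List.range ((T - cnt) / 5)).map (ceF T big) ++ [ceF T big ((T - cnt) / 5)]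
          = (List.range ((T - (cnt - 5)) / 5)).map (ceF T big) := by
        have : (T - (cnt - 5)) / 5 = (T - cnt) / 5 + 1 := by omega
        rw [this, List.range_succ, List.map_append, List.map_cons, List.map_nil]
      have hbuf : (big % 2 ^ cnt) &&& ((1 <<< (cnt - 5)) - 1) = big % 2 ^ (cnt - 5) := by
        rw [ceAndMask]; exact ceModMod big (cnt - 5) cnt (by omega)
      rw [hchar, hrange, hbuf]
      have := ih (cnt - 5) (by omega) (by omega) (by omega)
      rw [this]
      have : (cnt - 5) % 5 = cnt % 5 := by omega
      rw [this]
    · simp only [if_neg h5]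
      have h1 : cnt % 5 = cnt := Nat.mod_eq_of_lt (by omega)
      have h2 : (T - cnt) / 5 = T / 5 := by omega
      rw [h1, h2]

-- earlier output characters are unchanged by appending one more byte
theorem ceF_stable (big b T : Nat) (hb : b < 2 ^ 8) (i : Nat) (hi : 5 * (i + 1) ≤ T) :
    ceF T big i = ceF (T + 8) (big * 2 ^ 8 + b) i := by
  unfold ceF
  have : T + 8 - 5 * (i + 1) = (T - 5 * (i + 1)) + 8 := by omega
  rw [this, ceTopWindow big b _ hb]

-- one byte of A's for-loop, from the invariant state to the invariant state
theorem ceStep_spec (big b k : Nat) (hb : b < 2 ^ 8) :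
    ceWhile ((List.range (8 * k / 5)).map (ceF (8 * k) big))
      (((big % 2 ^ (8 * k % 5)) <<< 8) ||| b) (8 * k % 5 + 8)
    = ((List.range (8 * (k + 1) / 5)).map (ceF (8 * (k + 1)) (big * 256 + b)),
        (big * 256 + b) % 2 ^ (8 * (k + 1) % 5), 8 * (k + 1) % 5) := by
  set c := 8 * k % 5 with hc
  have h256 : (256 : Nat) = 2 ^ 8 := by norm_num
  have hbuf : ((big % 2 ^ c) <<< 8) ||| b = (big * 256 + b) % 2 ^ (c + 8) := by
    rw [ceOrAdd _ _ hb, h256]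
    -- (big % 2^c) * 2^8 + b = (big * 2^8 + b) % 2^(c+8)
    conv_rhs => rw [← Nat.div_add_mod big (2 ^ c)]
    have heq : (2 ^ c * (big / 2 ^ c) + big % 2 ^ c) * 2 ^ 8 + b
        = 2 ^ (c + 8) * (big / 2 ^ c) + ((big % 2 ^ c) * 2 ^ 8 + b) := by ring
    have h1 : big % 2 ^ c < 2 ^ c := Nat.mod_lt _ (by positivity)
    have hlt : big % 2 ^ c * 2 ^ 8 + b < 2 ^ (c + 8) := by calc (big % 2 ^ c) * 2 ^ 8 + b < (big % 2 ^ c) * 2 ^ 8 + 2 ^ 8 := by omega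
      _ = (big % 2 ^ c + 1) * 2 ^ 8 := by ring
      _ ≤ 2 ^ c * 2 ^ 8 := by
          exact Nat.mul_le_mul_right _ (by omega)
      _ = 2 ^ (c + 8) := by rw [← pow_add]
    rw [heq, Nat.mul_add_mod, Nat.mod_eq_of_lt hlt]
  have hmap : (List.range (8 * k / 5)).map (ceF (8 * k) big)
      = (List.range (8 * k / 5)).map (ceF (8 * (k + 1)) (big * 256 + b)) := by
    apply List.map_congr_left
    intro i hi
    rw [List.mem_range] at hi
    have h8 : 8 * (k + 1) = 8 * k + 8 := by ring
    rw [h8, h256, ceF_stable big b (8 * k) hb i (by omega)]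
  rw [hmap, hbuf]
  have h1 : c + 8 ≤ 8 * (k + 1) := by omega
  have h2 : 5 ∣ (8 * (k + 1) - (c + 8)) := by omega
  have h3 : 8 * (k + 1) - (c + 8) = 8 * k - c := by omega
  have h4 : (8 * k - c) / 5 = 8 * k / 5 := by omega
  have := ceWhile_spec (c + 8) (big * 256 + b) (8 * (k + 1)) h1 h2
  rw [h3, h4] at this
  rw [this]
  have h5 : (c + 8) % 5 = 8 * (k + 1) % 5 := by omega
  rw [h5]

-- the whole for-loop of A, by induction on the byte list, with the invariant state
theorem ceFold_spec (l : List Nat) (big k : Nat) (hl : ∀ b ∈ l, b < 256) :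
    l.foldl (fun st byte => ceWhile st.1 ((st.2.1 <<< 8) ||| byte) (st.2.2 + 8))
      ((List.range (8 * k / 5)).map (ceF (8 * k) big), big % 2 ^ (8 * k % 5), 8 * k % 5)
    = ((List.range (8 * (k + l.length) / 5)).map
          (ceF (8 * (k + l.length)) (l.foldl (fun a b => a * 256 + b) big)),
        (l.foldl (fun a b => a * 256 + b) big) % 2 ^ (8 * (k + l.length) % 5),
        8 * (k + l.length) % 5) := by
  induction l generalizing big k with
  | nil => simp
  | cons b t ih =>
    simp only [List.foldl_cons]
    have hb : b < 2 ^ 8 := by norm_num; exact hl b (List.mem_cons_self ..)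
    rw [ceStep_spec big b k hb, ih (big * 256 + b) (k + 1) (fun x hx => hl x (List.mem_cons_of_mem _ hx))]
    have : k + 1 + t.length = k + (t.length + 1) := by ring
    simp [this]

theorem custom_encode_eq_alt (s : String) (hdom : ∀ b ∈ s.toList.map Char.toNat, b < 256) :
    custom_encode s = custom_encode_alt s := by
  simp only [custom_encode, custom_encode_alt]
  set data := s.toList.map Char.toNat with hdata
  have hstart : (([] : List Char), (0 : Nat), (0 : Nat))
      = ((List.range (8 * 0 / 5)).map (ceF (8 * 0) 0), (0 : Nat) % 2 ^ (8 * 0 % 5), 8 * 0 % 5) := by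
    simp
  rw [hstart, ceFold_spec data 0 0 hdom]
  set big := data.foldl (fun a b => a * 256 + b) 0 with hbig
  simp only [Nat.zero_add]
  set n := 8 * data.length with hn
  have hmul : n = 8 * data.length := hn
  -- the two main output lists coincide (ceF is B's map function; charsets are the same list)
  have hout : (List.range (n / 5)).map (ceF n big)
      = (List.range (n / 5)).map
          (fun i => altCharset.getD ((big >>> (n - 5 * (i + 1))) &&& 0x1F) 'A') := rfl
  by_cases hrem : 0 < n % 5
  · simp only [if_pos hrem, hout]
    -- padding character: A's extra `&&& 0x1F` is the identity on the < 32 value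
    have hpad : ceCharset.getD (((big % 2 ^ (n % 5)) <<< (5 - n % 5)) &&& 0x1F) 'A'
        = altCharset.getD ((big &&& ((1 <<< (n % 5)) - 1)) <<< (5 - n % 5)) 'A' := by
      rw [ceAndMask big (n % 5)]
      have hlt : (big % 2 ^ (n % 5)) <<< (5 - n % 5) < 2 ^ 5 := by
        rw [Nat.shiftLeft_eq]
        have h1 : big % 2 ^ (n % 5) < 2 ^ (n % 5) := Nat.mod_lt _ (by positivity)
        calc (big % 2 ^ (n % 5)) * 2 ^ (5 - n % 5)
            < 2 ^ (n % 5) * 2 ^ (5 - n % 5) := by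
              exact Nat.mul_lt_mul_of_lt_of_le h1 le_rfl (by positivity)
          _ = 2 ^ (n % 5 + (5 - n % 5)) := by rw [← pow_add]
          _ ≤ 2 ^ 5 := Nat.pow_le_pow_right (by omega) (by omega)
      rw [ceAnd31, Nat.mod_eq_of_lt hlt]
      rfl
    rw [hpad]
  · simp only [if_neg hrem, hout]

-- ===== VERDICT (by name: the statement is the Claim_ definition above) =====
theorem custom_encode_spec : Claim_equal_custom_encode := by
  intro s hdom
  unfold Spec_custom_encode
  apply custom_encode_eq_alt
  intro b hb
  simp only [List.mem_map] at hb
  obtain ⟨c, hc, rfl⟩ := hb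
  unfold Dom_custom_encode pvDomStr at hdom
  have h := List.all_eq_true.mp hdom c hc
  unfold pvDomChar at h
  simp only [Bool.or_eq_true, Bool.and_eq_true, decide_eq_true_eq, beq_iff_eq] at h
  omega
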